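-- pv_equiv track=rewrite | github.com/DjDevilCloud/EPIC-SHARC-MOHTE | pretokenize.py | _file_partition_ranges
-- ===== SOURCE A (Python) =====
-- from typing import Any, Iterable, Iterator, Optional, Sequence
--
-- def _file_partition_ranges(items: Sequence[Any], shard_count: int) -> list[Sequence[Any]]:
--     shard_count = max(1, int(shard_count))
--     if shard_count <= 1 or len(items) <= 1:
--         return [tuple(items)]
--     shard_count = min(shard_count, len(items))
--     total_weight = len(items)
--     base = total_weight // shard_count
--     extra = total_weight % shard_count
--     ranges: list[Sequence[Any]] = []
--     start = 0
--     for index in range(shard_count):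
--         stop = start + base + (1 if index < extra else 0)
--         ranges.append(tuple(items[start:stop]))
--         start = stop
--     return [group for group in ranges if group]
-- ===== SOURCE B (Python) =====
-- def _file_partition_ranges(items, shard_count):
--     shard_count = max(1, int(shard_count))
--     if shard_count <= 1 or len(items) <= 1:
--         return [tuple(items)]
--     # peeling: repeatedly split off the first shard of size ceil(len(rest)/k)
--     k = min(shard_count, len(items))
--     shards = []
--     rest = items
--     while k > 1:
--         head = -(-len(rest) // k)
--         shards.append(tuple(rest[:head]))
--         rest = rest[head:]
--         k -= 1
--     shards.append(tuple(rest))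
--     return shards
-- ===== Notes on version B (the rewrite author's own statement) =====
-- stated objective: alternative
-- what changed: B replaces A's single loop over precomputed base/extra sizes with a threaded running start (plus a trailing non-empty filter) by a peeling scheme: a loop that repeatedly splits off the first shard of size ceil(len(rest)/k) from the remaining suffix and decrements k.
import Mathlib
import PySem

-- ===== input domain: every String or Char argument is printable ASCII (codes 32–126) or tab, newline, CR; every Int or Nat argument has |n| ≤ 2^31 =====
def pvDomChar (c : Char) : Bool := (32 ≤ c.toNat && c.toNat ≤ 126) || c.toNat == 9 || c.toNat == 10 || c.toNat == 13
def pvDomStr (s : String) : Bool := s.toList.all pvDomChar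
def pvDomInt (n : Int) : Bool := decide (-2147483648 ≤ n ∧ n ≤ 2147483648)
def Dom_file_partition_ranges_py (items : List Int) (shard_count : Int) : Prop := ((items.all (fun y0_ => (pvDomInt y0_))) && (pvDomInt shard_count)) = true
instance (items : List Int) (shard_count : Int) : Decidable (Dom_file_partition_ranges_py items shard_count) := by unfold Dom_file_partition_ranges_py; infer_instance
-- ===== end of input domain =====

-- B replaces A's precomputed-sizes loop with a threaded running start by a peeling
-- loop (split off the first shard of size ceil(len(rest)/k), k -= 1); objective: alternative.

-- ===== PORT A =====
def file_partition_ranges_py (items : List Int) (shard_count : Int) : List (List Int) :=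
  let sc := max 1 shard_count
  if sc ≤ 1 ∨ (items.length : Int) ≤ 1 then [items]
  else
    let sc2 := min sc (items.length : Int)
    let total := (items.length : Int)
    let base := PySem.Int.floordiv total sc2
    let extra := PySem.Int.mod total sc2
    let st := (PySem.List.pyRange 0 sc2 1).foldl
      (fun (st : List (List Int) × Int) index =>
        let stop := st.2 + base + (if index < extra then 1 else 0)
        (st.1 ++ [PySem.List.slice items (some st.2) (some stop)], stop))
      (([] : List (List Int)), (0 : Int))
    st.1.filter (fun g => !g.isEmpty)

-- ===== PORT B =====
-- peeling loop: mirror of Source B's 'while k > 1' with state (shards, rest, k)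
def pvPeelLoop (shards : List (List Int)) (rest : List Int) (k : Int) : List (List Int) :=
  if h : k ≤ 1 then shards ++ [rest]
  else
    let head := -(PySem.Int.floordiv (-(rest.length : Int)) k)  -- ceil(len/k) via Python's -(-n//k)
    pvPeelLoop (shards ++ [PySem.List.slice rest none (some head)])
      (PySem.List.slice rest (some head) none) (k - 1)
termination_by k.toNat
decreasing_by omega

def file_partition_ranges_py_alt (items : List Int) (shard_count : Int) : List (List Int) :=
  let sc := max 1 shard_count
  if sc ≤ 1 ∨ (items.length : Int) ≤ 1 then [items]
  else pvPeelLoop [] items (min sc (items.length : Int))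

-- ===== PRECONDITION & SPEC =====
def Spec_file_partition_ranges_py (items : List Int) (shard_count : Int) (out : List (List Int)) : Prop := out = file_partition_ranges_py_alt items shard_count
instance (items : List Int) (shard_count : Int) (out : List (List Int)) : Decidable (Spec_file_partition_ranges_py items shard_count out) := by unfold Spec_file_partition_ranges_py; infer_instance

-- ===== CLAIM =====
def Claim_equal_file_partition_ranges_py : Prop := ∀ (items : List Int) (shard_count : Int), Dom_file_partition_ranges_py items shard_count → Spec_file_partition_ranges_py items shard_count (file_partition_ranges_py items shard_count)

-- ===== LEMMAS AND PROOFS =====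

-- recursive form of the peeling loop, used only by the proofs
def pvPeel (seq : List Int) (k : Int) : List (List Int) :=
  if h : k ≤ 1 then [seq]
  else
    let head := -(PySem.Int.floordiv (-(seq.length : Int)) k)
    PySem.List.slice seq none (some head) :: pvPeel (PySem.List.slice seq (some head) none) (k - 1)
termination_by k.toNat
decreasing_by omega

lemma pvPeelLoop_eq : ∀ (K : Nat) (k : Int), k.toNat = K →
    ∀ (acc : List (List Int)) (rest : List Int), pvPeelLoop acc rest k = acc ++ pvPeel rest k := by
  intro K
  induction K using Nat.strong_induction_on with
  | _ K ih =>
    intro k hK acc rest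
    rw [pvPeelLoop, pvPeel]
    by_cases h : k ≤ 1
    · simp [h]
    · simp only [dif_neg h]
      rw [ih (k - 1).toNat (by omega) (k - 1) rfl]
      simp

-- closed-form shard boundary (Nat form)
def pvBd (base extra i : Nat) : Nat := base * i + min i extra

-- canonical chunking both ports are reduced to
def pvCanon (seq : List Int) (base extra K : Nat) : List (List Int) :=
  (List.range K).map (fun i => (seq.drop (pvBd base extra i)).take (pvBd base extra (i+1) - pvBd base extra i))

-- A's fold with a running start equals the map with closed-form Int boundaries.
lemma pvFold (items : List Int) (base extra : Int) (hex : 0 ≤ extra) (K : Nat) :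
    (PySem.List.pyRange 0 (K : Int) 1).foldl
      (fun (st : List (List Int) × Int) index =>
        (st.1 ++ [PySem.List.slice items (some st.2) (some (st.2 + base + if index < extra then 1 else 0))],
         st.2 + base + if index < extra then 1 else 0))
      (([] : List (List Int)), (0 : Int))
    = ((PySem.List.pyRange 0 (K : Int) 1).map
        (fun i => PySem.List.slice items (some (base * i + min i extra))
                                        (some (base * (i + 1) + min (i + 1) extra))),
       base * (K : Int) + min (K : Int) extra) := by
  induction K with
  | zero =>
      rw [show ((0 : Nat) : Int) = 0 from rfl, PySem.List.pyRange_one_eq_nil le_rfl]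
      simp [min_eq_left hex]
  | succ m ih =>
      have hc : ((m + 1 : Nat) : Int) = (m : Int) + 1 := by push_cast; ring
      rw [hc, PySem.List.pyRange_one_succ_right (Int.natCast_nonneg m)]
      rw [List.foldl_append, List.map_append, ih]
      simp only [List.foldl_cons, List.foldl_nil, List.map_cons, List.map_nil]
      have hstop : base * (m : Int) + min (m : Int) extra + base + (if (m : Int) < extra then 1 else 0)
          = base * ((m : Int) + 1) + min ((m : Int) + 1) extra := by
        have hb : base * ((m : Int) + 1) = base * (m : Int) + base := by ring
        rw [hb]; split_ifs <;> omega
      rw [hstop]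

lemma pvSliceNe (items : List Int) (a b : Int) (h0 : 0 ≤ a) (hab : a < b)
    (hb : b ≤ (items.length : Int)) :
    PySem.List.slice items (some a) (some b) ≠ [] := by
  rw [PySem.List.slice_toNat items h0 (by omega)]
  intro hnil
  have := congrArg List.length hnil
  simp only [List.length_take, List.length_drop, List.length_nil] at this
  omega

-- B's recursive peeling equals the canonical chunking.
lemma pvPeel_canon : ∀ (K : Nat), 1 ≤ K → ∀ (seq : List Int) (base extra : Nat),
    extra < K → seq.length = base * K + extra →
    pvPeel seq (K : Int) = pvCanon seq base extra K := by
  intro K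
  induction K with
  | zero => omega
  | succ m ih =>
      intro _ seq base extra hex hlen
      by_cases hm : m = 0
      · subst hm
        rw [pvPeel]
        have : ((1 : Nat) : Int) ≤ 1 := by omega
        rw [dif_pos (by omega : ((1 : Nat) : Int) ≤ 1)]
        simp only [pvCanon, pvBd]
        have hex0 : extra = 0 := by omega
        subst hex0
        simp [List.take_of_length_le, hlen]
      · -- m ≥ 1, so k = m+1 ≥ 2
        have hm1 : 1 ≤ m := by omega
        rw [pvPeel]
        rw [dif_neg (by push_cast; omega : ¬ ((m + 1 : Nat) : Int) ≤ 1)]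
        -- the head is ceil(n/(m+1)) = base + (extra == 0 ? 0 : 1)
        set hN : Nat := base + (if extra = 0 then 0 else 1) with hhN
        have hhead : -(PySem.Int.floordiv (-(seq.length : Int)) ((m + 1 : Nat) : Int)) = (hN : Nat) := by
          rw [PySem.Int.neg_floordiv_neg_eq_iff_of_pos (by push_cast; omega)]
          rcases Nat.eq_zero_or_pos extra with h0 | h0
          · simp only [hhN, h0]
            push_cast [hlen, h0]
            constructor <;> nlinarith
          · simp only [hhN, if_neg (by omega : ¬ extra = 0)]
            push_cast [hlen]
            constructor <;> nlinarith
        rw [hhead]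
        dsimp only
        rw [PySem.List.slice_to_natCast, PySem.List.slice_from_natCast]
        rw [show ((m + 1 : Nat) : Int) - 1 = ((m : Nat) : Int) by push_cast; ring]
        have htail : (seq.drop hN).length = base * m + (extra - 1) := by
          rcases Nat.eq_zero_or_pos extra with h0 | h0
          · simp [List.length_drop, hlen, hhN, Nat.mul_succ, h0]
          · simp [List.length_drop, hlen, hhN, Nat.mul_succ, Nat.pos_iff_ne_zero.mp h0] <;> omega
        rw [ih hm1 (seq.drop hN) base (extra - 1) (by omega) htail]
        -- assemble: head :: canon tail = canon (m+1)
        simp only [pvCanon, List.range_succ_eq_map, List.map_cons, List.map_map]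
        congr 1
        · have e1 : pvBd base extra (0 + 1) - 0 = hN := by
            rcases Nat.eq_zero_or_pos extra with h0 | h0
            · simp [pvBd, hhN, h0]
            · simp [pvBd, hhN, Nat.pos_iff_ne_zero.mp h0] <;> omega
          have e0 : pvBd base extra 0 = 0 := by simp [pvBd]
          rw [e0, e1, List.drop_zero]
        · apply List.map_congr_left
          intro i _
          simp only [Function.comp]
          rw [List.drop_drop]
          have h1 : pvBd base (extra - 1) i + hN = pvBd base extra (i + 1) := by
            rcases Nat.eq_zero_or_pos extra with h0 | h0
            · simp [pvBd, hhN, Nat.mul_succ, h0]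
            · simp [pvBd, hhN, Nat.mul_succ, Nat.pos_iff_ne_zero.mp h0] <;> omega
          have h2 : pvBd base (extra - 1) (i + 1) - pvBd base (extra - 1) i
              = pvBd base extra (i + 1 + 1) - pvBd base extra (i + 1) := by
            simp only [pvBd, Nat.mul_succ]; omega
          simp only [Nat.succ_eq_add_one, Nat.add_comm hN _]
          rw [h1, h2]

-- ===== VERDICT =====
theorem file_partition_ranges_py_spec : Claim_equal_file_partition_ranges_py := by
  intro items shard_count _
  unfold Spec_file_partition_ranges_py file_partition_ranges_py file_partition_ranges_py_alt
  by_cases h : max 1 shard_count ≤ 1 ∨ (items.length : Int) ≤ 1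
  · simp only [if_pos h]
  · simp only [if_neg h]
    push Not at h
    obtain ⟨h1, h2⟩ := h
    set n : Int := (items.length : Int) with hn
    set k : Int := min (max 1 shard_count) n with hk
    have hk2 : 2 ≤ k := by omega
    have hkn : k ≤ n := by omega
    set K : Nat := k.toNat with hK
    have hkc : ((K : Nat) : Int) = k := by omega
    set baseN : Nat := items.length / K with hbaseN
    set extraN : Nat := items.length % K with hextraN
    have hfd : PySem.Int.floordiv n k = (baseN : Int) := by
      rw [hn, ← hkc]; exact_mod_cast PySem.Int.floordiv_natCast items.length K
    have hmd : PySem.Int.mod n k = (extraN : Int) := by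
      rw [hn, ← hkc]; exact_mod_cast PySem.Int.mod_natCast items.length K
    have hKpos : 1 ≤ K := by omega
    have hexK : extraN < K := Nat.mod_lt _ (by omega)
    have hlen : items.length = baseN * K + extraN := by
      rw [hbaseN, hextraN, Nat.add_comm, Nat.mod_add_div']
    have hb1 : 1 ≤ baseN := by
      have : K ≤ items.length := by omega
      exact Nat.one_le_div_iff (by omega) |>.mpr this
    -- A side: fold → Int-bound map → filter is identity → canonical form
    rw [hfd, hmd, ← hkc, pvFold items (baseN : Int) (extraN : Int) (by positivity) K]
    rw [List.filter_eq_self.mpr]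
    · -- the Int-bound map is the canonical chunking, which also equals B
      rw [pvPeelLoop_eq ((K : Int)).toNat (K : Int) rfl, List.nil_append,
          pvPeel_canon K hKpos items baseN extraN hexK hlen]
      rw [PySem.List.pyRange_one, List.map_map]
      simp only [Int.sub_zero, Int.toNat_natCast, pvCanon]
      apply List.map_congr_left
      intro j hj
      simp only [Function.comp, zero_add] at *
      rw [PySem.List.slice_toNat items (by positivity) (by positivity),
          show ((baseN : Int) * (↑j + 1) + min (↑j + 1) ↑extraN)
              = ((baseN * (j + 1) + min (j + 1) extraN : Nat) : Int) from by push_cast; ring,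
          show ((baseN : Int) * ↑j + min ↑j ↑extraN)
              = ((baseN * j + min j extraN : Nat) : Int) from by push_cast; ring,
          Int.toNat_natCast, Int.toNat_natCast]
      simp [pvBd]
    · -- every produced slice is non-empty
      intro g hg
      rcases List.mem_map.mp hg with ⟨i, hi, rfl⟩
      rcases (PySem.List.mem_pyRange_one).mp hi with ⟨hi0, hik⟩
      have hik' : i + 1 ≤ k := by omega
      have hbi : 0 ≤ (baseN : Int) * i := by positivity
      have hbk : (baseN : Int) * (i + 1) ≤ (baseN : Int) * k :=
        mul_le_mul_of_nonneg_left hik' (by positivity)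
      have hstep : (baseN : Int) * (i + 1) = (baseN : Int) * i + baseN := by ring
      have hb1I : (1 : Int) ≤ (baseN : Int) := by exact_mod_cast hb1
      have hne : PySem.List.slice items (some ((baseN : Int) * i + min i (extraN : Int)))
          (some ((baseN : Int) * (i + 1) + min (i + 1) (extraN : Int))) ≠ [] := by
        apply pvSliceNe items _ _ (by omega) (by omega) _
        have hsum : (baseN : Int) * k + (extraN : Int) = n := by
          rw [← hkc, hn]; push_cast [hlen]; ring
        omega
      simpa using hne
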